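-- pv_equiv track=rewrite | github.com/nerap/Convert_base64 | convert_base64/base64_to_Ascii.py | convert_binaries_to_decimal
-- ===== SOURCE A (Python) =====
-- def convert_binaries_to_decimal(list_8_bit):
--     """
--
--             Convert a list of binaries to a list of integers
--
--
--              Args :
--
--                 A list of 8 bit binaries as list
--
--
--              Returns :
--
--                 A list with all element of the list converted
--
--     """
--
--     def bin_to_dec(element):
--
--         result = 0
--
--         for i in range(0, len(element)):
--             if element[(len(element) - 1) - i] == "1":
--                 result += 2 ** i
--         return result
--
--     list_integers = []
--     for elem in list_8_bit:
--         list_integers.append(bin_to_dec(elem))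
--
--     return list_integers
-- ===== SOURCE B (Python) =====
-- def convert_binaries_to_decimal(list_8_bit):
--     """Convert a list of binary strings to decimal integers (Horner's method)."""
--
--     def horner(element):
--         result = 0
--         for ch in element:
--             result = result * 2 + (1 if ch == "1" else 0)
--         return result
--
--     return [horner(elem) for elem in list_8_bit]
-- ===== Notes on version B (the rewrite author's own statement) =====
-- stated objective: faster
-- what changed: Replaces the back-to-front indexed bit-summation (result += 2**i for each '1' at position len-1-i) by a single left-to-right Horner accumulation result = result*2 + (1 if ch == '1' else 0), with the outer loop as a comprehension.
import Mathlib
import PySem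

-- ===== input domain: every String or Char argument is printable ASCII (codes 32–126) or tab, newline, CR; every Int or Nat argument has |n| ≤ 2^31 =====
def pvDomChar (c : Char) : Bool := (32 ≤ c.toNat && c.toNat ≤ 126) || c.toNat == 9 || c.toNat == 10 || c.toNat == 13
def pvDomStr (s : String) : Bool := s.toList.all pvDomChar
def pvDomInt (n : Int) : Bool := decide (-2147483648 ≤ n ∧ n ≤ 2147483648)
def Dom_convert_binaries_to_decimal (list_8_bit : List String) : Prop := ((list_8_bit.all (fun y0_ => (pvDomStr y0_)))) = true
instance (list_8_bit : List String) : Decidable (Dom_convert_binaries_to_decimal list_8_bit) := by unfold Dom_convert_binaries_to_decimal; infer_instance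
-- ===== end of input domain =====

-- B replaces A's back-to-front bit summation (2**i per '1' at index len-1-i) by a
-- left-to-right Horner accumulation; equal results, proved below. Objective: alternative.

-- ===== PORT A =====
-- element[(len-1)-i] == "1" is ported as indexing the character list and comparing to '1' (exact: 1-char string equality)
def pvBinToDec (element : String) : Int :=
  (PySem.List.pyRange 0 (PySem.Str.len element) 1).foldl
    (fun result i =>
      if PySem.List.pyGet? element.toList ((PySem.Str.len element - 1) - i) = some '1'
      then result + 2 ^ i.toNat else result) 0

def convert_binaries_to_decimal (list_8_bit : List String) : List Int :=
  list_8_bit.foldl (fun list_integers elem => list_integers ++ [pvBinToDec elem]) []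

-- ===== PORT B =====
def pvHorner (element : String) : Int :=
  element.toList.foldl (fun result ch => result * 2 + (if ch = '1' then 1 else 0)) 0

def convert_binaries_to_decimal_alt (list_8_bit : List String) : List Int :=
  list_8_bit.map pvHorner

-- ===== PRECONDITION & SPEC =====
def Spec_convert_binaries_to_decimal (list_8_bit : List String) (out : List Int) : Prop := out = convert_binaries_to_decimal_alt list_8_bit
instance (list_8_bit : List String) (out : List Int) : Decidable (Spec_convert_binaries_to_decimal list_8_bit out) := by unfold Spec_convert_binaries_to_decimal; infer_instance

-- ===== CLAIM (what is proved, stated in full; the proofs are below) =====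
def Claim_equal_convert_binaries_to_decimal : Prop := ∀ (list_8_bit : List String), Dom_convert_binaries_to_decimal list_8_bit → Spec_convert_binaries_to_decimal list_8_bit (convert_binaries_to_decimal list_8_bit)

-- ===== LEMMAS AND PROOFS =====

-- Horner fold from an arbitrary accumulator
theorem pvHorner_go (l : List Char) (r : Int) :
    l.foldl (fun result ch => result * 2 + (if ch = '1' then 1 else 0)) r
      = r * 2 ^ l.length + l.foldl (fun result ch => result * 2 + (if ch = '1' then 1 else 0)) 0 := by
  induction l generalizing r with
  | nil => simp
  | cons c t ih =>
    simp only [List.foldl_cons, List.length_cons]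
    rw [ih, ih ((0 : Int) * 2 + _)]
    ring

-- A's inner loop value on a character list
def pvAVal (l : List Char) : Int :=
  (PySem.List.pyRange 0 (l.length : Int) 1).foldl
    (fun result i =>
      if PySem.List.pyGet? l (((l.length : Int) - 1) - i) = some '1'
      then result + 2 ^ i.toNat else result) 0

theorem pvAVal_eq_horner (l : List Char) :
    pvAVal l = l.foldl (fun result ch => result * 2 + (if ch = '1' then 1 else 0)) 0 := by
  induction l with
  | nil => simp [pvAVal, PySem.List.pyRange_one_eq_nil]
  | cons c t ih =>
    have hn : ((c :: t).length : Int) = (t.length : Int) + 1 := by simp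
    unfold pvAVal
    rw [hn, PySem.List.pyRange_one_succ_right (by positivity), List.foldl_append]
    have hcongr :
        (PySem.List.pyRange 0 (t.length : Int) 1).foldl
          (fun result i =>
            if PySem.List.pyGet? (c :: t) (((t.length : Int) + 1 - 1) - i) = some '1'
            then result + 2 ^ i.toNat else result) 0
        = pvAVal t := by
      unfold pvAVal
      apply PySem.List.foldl_congr_mem
      intro acc i hi
      rw [PySem.List.mem_pyRange_one] at hi
      have h1 : ((t.length : Int) + 1 - 1) - i = (((t.length : Int) - 1) - i) + 1 := by omega
      rw [h1]
      have h2 : ((t.length : Int) - 1) - i = ((((t.length : Int) - 1 - i).toNat : Nat) : Int) := by omega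
      rw [h2, PySem.List.pyGet?_cons_succ]
    rw [hcongr, ih]
    simp only [List.foldl_cons]
    have hlast : ((t.length : Int) + 1 - 1) - (t.length : Int) = 0 := by omega
    rw [hlast, PySem.List.pyGet?_zero_cons]
    rw [pvHorner_go t ((0 : Int) * 2 + (if c = '1' then 1 else 0))]
    have htn : ((t.length : Int)).toNat = t.length := by omega
    by_cases hc : c = '1'
    · simp [hc, htn]; ring
    · simp [hc]

-- the append-accumulator loop of A is map
theorem pvFoldl_append_map (l : List String) (acc : List Int) :
    l.foldl (fun list_integers elem => list_integers ++ [pvBinToDec elem]) acc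
      = acc ++ l.map pvBinToDec := by
  induction l generalizing acc with
  | nil => simp
  | cons x t ih => simp [ih]

theorem pvBinToDec_eq_horner (s : String) : pvBinToDec s = pvHorner s := by
  have h : pvBinToDec s = pvAVal s.toList := by
    simp [pvBinToDec, pvAVal, PySem.Str.len_eq]
  rw [h, pvAVal_eq_horner, pvHorner]

-- ===== VERDICT (by name: the statement is the Claim_ definition above) =====
theorem convert_binaries_to_decimal_spec : Claim_equal_convert_binaries_to_decimal := by
  intro l _
  unfold Spec_convert_binaries_to_decimal convert_binaries_to_decimal convert_binaries_to_decimal_alt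
  rw [pvFoldl_append_map]
  simp [List.map_congr_left (fun s _ => pvBinToDec_eq_horner s)]
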